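-- pv_equiv track=rewrite | github.com/FranciscoBelo/Agents | aqualin_treatment.py | calcular_tempo_tratamento
-- ===== SOURCE A (Python) =====
-- def calcular_tempo_tratamento(saude: int) -> int:
--     """Calcula o tempo necessário para levar saúde de 'saude' até 100"""
--     if saude >= 100:
--         return 0
--
--     tics = 0
--     saude_atual = saude
--
--     while saude_atual < 100:
--         if saude_atual > 50:
--             # +1 ponto por cada tic
--             tics += (100 - saude_atual)
--             saude_atual = 100
--         elif saude_atual > 20:
--             # +1 ponto por cada 10 tics
--             # Vamos até 51 ou até 100
--             pontos_ate_51 = 51 - saude_atual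
--             tics += pontos_ate_51 * 10
--             saude_atual = 51
--         elif saude_atual > 10:
--             # +1 ponto por cada sol (100 tics)
--             # Vamos até 21
--             pontos_ate_21 = 21 - saude_atual
--             tics += pontos_ate_21 * 100
--             saude_atual = 21
--         else:  # saude_atual > 0
--             # +1 ponto por cada 10 sols (1000 tics)
--             # Vamos até 11
--             pontos_ate_11 = 11 - saude_atual
--             tics += pontos_ate_11 * 1000
--             saude_atual = 11
--
--     return tics
-- ===== SOURCE B (Python) =====
-- def calcular_tempo_tratamento(saude: int) -> int:
--     """Calcula o tempo necessário para levar saúde de 'saude' até 100"""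
--     if saude >= 100:
--         return 0
--     if saude > 50:
--         return 100 - saude
--     if saude > 20:
--         return (51 - saude) * 10 + 49
--     if saude > 10:
--         return (21 - saude) * 100 + 349
--     return (11 - saude) * 1000 + 1349
-- ===== Notes on version B (the rewrite author's own statement) =====
-- stated objective: simpler
-- what changed: Replaced the phase-stepping while loop with a piecewise closed-form formula: one branch per healing phase with the fixed cumulative costs (49, 349, 1349) of the higher phases baked in.
import Mathlib
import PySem

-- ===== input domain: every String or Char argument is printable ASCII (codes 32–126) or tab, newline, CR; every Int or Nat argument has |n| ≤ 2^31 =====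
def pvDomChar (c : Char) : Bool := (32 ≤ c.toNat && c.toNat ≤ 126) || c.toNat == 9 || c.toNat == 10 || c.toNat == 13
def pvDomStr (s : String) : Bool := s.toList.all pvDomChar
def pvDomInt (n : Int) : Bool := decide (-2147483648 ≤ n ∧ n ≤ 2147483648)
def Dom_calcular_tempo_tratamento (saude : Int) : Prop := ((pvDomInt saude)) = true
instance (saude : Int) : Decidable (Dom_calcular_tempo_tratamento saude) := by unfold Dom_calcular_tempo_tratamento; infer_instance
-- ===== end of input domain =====

-- B replaces A's phase-stepping while loop by a piecewise closed-form formula (objective: simpler).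

-- ===== PORT A =====
-- the while loop, step for step; state = (tics, saude_atual); terminates since saude_atual strictly increases toward 100
def pvLoopA (tics saude_atual : Int) : Int :=
  if saude_atual < 100 then
    if saude_atual > 50 then
      pvLoopA (tics + (100 - saude_atual)) 100
    else if saude_atual > 20 then
      pvLoopA (tics + (51 - saude_atual) * 10) 51
    else if saude_atual > 10 then
      pvLoopA (tics + (21 - saude_atual) * 100) 21
    else
      pvLoopA (tics + (11 - saude_atual) * 1000) 11
  else tics
termination_by (100 - saude_atual).toNat
decreasing_by all_goals omega

def calcular_tempo_tratamento (saude : Int) : Int :=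
  if saude ≥ 100 then 0
  else pvLoopA 0 saude

-- ===== PORT B =====
def calcular_tempo_tratamento_alt (saude : Int) : Int :=
  if saude ≥ 100 then 0
  else if saude > 50 then 100 - saude
  else if saude > 20 then (51 - saude) * 10 + 49
  else if saude > 10 then (21 - saude) * 100 + 349
  else (11 - saude) * 1000 + 1349

-- ===== PRECONDITION & SPEC =====
def Spec_calcular_tempo_tratamento (saude : Int) (out : Int) : Prop := out = calcular_tempo_tratamento_alt saude
instance (saude : Int) (out : Int) : Decidable (Spec_calcular_tempo_tratamento saude out) := by unfold Spec_calcular_tempo_tratamento; infer_instance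

-- ===== CLAIM (what is proved, stated in full; the proofs are below) =====
def Claim_equal_calcular_tempo_tratamento : Prop := ∀ (saude : Int), Dom_calcular_tempo_tratamento saude → Spec_calcular_tempo_tratamento saude (calcular_tempo_tratamento saude)

-- ===== LEMMAS AND PROOFS =====
lemma pvLoopA_ge (t s : Int) (h : ¬ s < 100) : pvLoopA t s = t := by
  rw [pvLoopA]; simp [h]

lemma pvLoopA_hi (t s : Int) (h1 : s < 100) (h2 : s > 50) :
    pvLoopA t s = t + (100 - s) := by
  rw [pvLoopA]; simp only [if_pos h1, if_pos h2]
  rw [pvLoopA_ge _ 100 (by omega)]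

lemma pvLoopA_mid (t s : Int) (h1 : s < 100) (h2 : ¬ s > 50) (h3 : s > 20) :
    pvLoopA t s = t + (51 - s) * 10 + 49 := by
  rw [pvLoopA]; simp only [if_pos h1, if_neg h2, if_pos h3]
  rw [pvLoopA_hi _ 51 (by omega) (by omega)]; ring

lemma pvLoopA_low (t s : Int) (h1 : s < 100) (h2 : ¬ s > 20) (h3 : s > 10) :
    pvLoopA t s = t + (21 - s) * 100 + 349 := by
  rw [pvLoopA]; simp only [if_pos h1, if_neg (by omega : ¬ s > 50), if_neg h2, if_pos h3]
  rw [pvLoopA_mid _ 21 (by omega) (by omega) (by omega)]; ring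

lemma pvLoopA_bot (t s : Int) (h2 : ¬ s > 10) :
    pvLoopA t s = t + (11 - s) * 1000 + 1349 := by
  rw [pvLoopA]
  simp only [if_pos (by omega : s < 100), if_neg (by omega : ¬ s > 50),
    if_neg (by omega : ¬ s > 20), if_neg h2]
  rw [pvLoopA_low _ 11 (by omega) (by omega) (by omega)]; ring

-- ===== VERDICT (by name: the statement is the Claim_ definition above) =====
theorem calcular_tempo_tratamento_spec : Claim_equal_calcular_tempo_tratamento := by
  intro saude _
  unfold Spec_calcular_tempo_tratamento calcular_tempo_tratamento calcular_tempo_tratamento_alt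
  by_cases h0 : saude ≥ 100
  · simp [h0]
  · simp only [if_neg h0]
    by_cases h1 : saude > 50
    · rw [pvLoopA_hi 0 saude (by omega) h1]; simp [h1]
    · by_cases h2 : saude > 20
      · rw [pvLoopA_mid 0 saude (by omega) h1 h2]; simp [h1, h2]
      · by_cases h3 : saude > 10
        · rw [pvLoopA_low 0 saude (by omega) h2 h3]; simp [h1, h2, h3]
        · rw [pvLoopA_bot 0 saude h3]; simp [h1, h2, h3]
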